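-- pv_equiv track=rewrite | github.com/Tyler-Rogel1/DiscreteMath | baseExchange.py | fromBaseTen
-- ===== SOURCE A (Python) =====
-- def fromBaseTen(alphabet, num):
--     num = int(num)
--     base = len(alphabet)
--     result = ""
--     quotient = num // base
--     remainder = num % base
--     num = quotient
--     result = alphabet[remainder] + result
--     while quotient != 0:
--         quotient = num // base
--         remainder = num % base
--         num = quotient
--         result = alphabet[remainder] + result
--     return result
-- ===== SOURCE B (Python) =====
-- def fromBaseTen(alphabet, num):
--     num = int(num)
--     base = len(alphabet)
--     def rec(n):
--         q, r = divmod(n, base)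
--         return (rec(q) if q != 0 else '') + alphabet[r]
--     return rec(num)
-- ===== Notes on version B (the rewrite author's own statement) =====
-- stated objective: simpler
-- what changed: Replaces the unrolled do-while loop with string prepending by a recursive divmod digit extraction that assembles digits most-significant-first via the call stack.
import Mathlib
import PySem

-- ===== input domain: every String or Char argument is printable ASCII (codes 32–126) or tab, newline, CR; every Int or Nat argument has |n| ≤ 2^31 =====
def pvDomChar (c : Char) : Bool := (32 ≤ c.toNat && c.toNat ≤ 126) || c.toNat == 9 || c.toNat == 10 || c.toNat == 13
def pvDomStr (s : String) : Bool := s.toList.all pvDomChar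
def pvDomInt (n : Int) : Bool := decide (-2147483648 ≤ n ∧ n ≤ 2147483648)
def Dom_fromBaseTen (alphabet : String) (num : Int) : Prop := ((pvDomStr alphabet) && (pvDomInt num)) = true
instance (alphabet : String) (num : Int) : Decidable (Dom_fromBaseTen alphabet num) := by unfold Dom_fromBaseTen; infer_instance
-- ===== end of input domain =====

-- B replaces A's unrolled do-while loop (prepending digits to a string) by a recursive
-- divmod digit extraction assembling digits via the call stack; objective: simpler.

-- ===== PORT A =====
-- alphabet[r] as a one-character list (in range under Pre_; Python raises out of range)
def pvDigit (al : List Char) (r : Int) : List Char :=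
  match PySem.List.pyGet? al r with
  | some c => [c]
  | none => []

-- the while loop; fuel only makes the recursion total (A diverges outside Pre_),
-- each step is exactly A's loop body
def pvLoopA (al : List Char) (base : Int) : Nat → Int → Int → List Char → List Char
  | 0, _, _, result => result
  | fuel+1, num, quotient, result =>
    if quotient ≠ 0 then
      pvLoopA al base fuel (PySem.Int.floordiv num base) (PySem.Int.floordiv num base)
        (pvDigit al (PySem.Int.mod num base) ++ result)
    else result

def fromBaseTen (alphabet : String) (num : Int) : String :=
  String.mk (pvLoopA alphabet.toList (alphabet.toList.length : Int) (num.toNat + 1)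
    (PySem.Int.floordiv num (alphabet.toList.length : Int))
    (PySem.Int.floordiv num (alphabet.toList.length : Int))
    (pvDigit alphabet.toList (PySem.Int.mod num (alphabet.toList.length : Int))))

-- ===== PORT B =====
-- rec(n): q, r = divmod(n, base); (rec(q) if q != 0 else '') + alphabet[r]
def pvRecB (al : List Char) (base : Int) : Nat → Int → List Char
  | 0, _ => []
  | fuel+1, n =>
    (if PySem.Int.floordiv n base ≠ 0 then pvRecB al base fuel (PySem.Int.floordiv n base) else [])
      ++ pvDigit al (PySem.Int.mod n base)

def fromBaseTen_alt (alphabet : String) (num : Int) : String :=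
  String.mk (pvRecB alphabet.toList (alphabet.toList.length : Int) (num.toNat + 1) num)

-- ===== PRECONDITION & SPEC =====
-- A raises ZeroDivisionError on an empty alphabet and never returns (infinite loop) for
-- negative num or for a one-character alphabet with num > 0; Pre_ excludes exactly those.
def Pre_fromBaseTen (alphabet : String) (num : Int) : Prop :=
  0 ≤ num ∧ 1 ≤ alphabet.toList.length ∧ (2 ≤ alphabet.toList.length ∨ num = 0)
instance (alphabet : String) (num : Int) : Decidable (Pre_fromBaseTen alphabet num) := by
  unfold Pre_fromBaseTen; infer_instance

def pvWitness_fromBaseTen : String × Int := ("01", 5)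

def Spec_fromBaseTen (alphabet : String) (num : Int) (out : String) : Prop := out = fromBaseTen_alt alphabet num
instance (alphabet : String) (num : Int) (out : String) : Decidable (Spec_fromBaseTen alphabet num out) := by unfold Spec_fromBaseTen; infer_instance

-- ===== CLAIM (what is proved, stated in full; the proofs are below) =====
def Claim_equal_fromBaseTen : Prop := ∀ (alphabet : String) (num : Int), Dom_fromBaseTen alphabet num → Pre_fromBaseTen alphabet num → Spec_fromBaseTen alphabet num (fromBaseTen alphabet num)

-- ===== LEMMAS AND PROOFS =====

theorem pv_fd_zero {b : Int} (hb : 0 < b) : PySem.Int.floordiv 0 b = 0 := by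
  rw [PySem.Int.floordiv_eq_ediv_of_pos hb]; simp

-- one division step: the quotient is nonnegative and strictly smaller
theorem pv_step_lt {n b : Int} (hn : 0 < n) (hb : 2 ≤ b) :
    0 ≤ PySem.Int.floordiv n b ∧ PySem.Int.floordiv n b < n := by
  constructor
  · rw [PySem.Int.floordiv_eq_ediv_of_pos (by omega)]
    exact Int.ediv_nonneg (by omega) (by omega)
  · rw [PySem.Int.floordiv_lt_iff_lt_mul (by omega)]
    nlinarith

-- pvRecB ignores the fuel as long as it exceeds n
theorem pvRecB_fuel {al : List Char} {b : Int} (hb : 2 ≤ b) :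
    ∀ (f₁ : Nat) (n : Int) (f₂ : Nat), 0 ≤ n → n.toNat < f₁ → n.toNat < f₂ →
      pvRecB al b f₁ n = pvRecB al b f₂ n := by
  intro f₁
  induction f₁ with
  | zero => intro n f₂ _ h1 _; omega
  | succ f ih =>
    intro n f₂ hn h1 h2
    match f₂, h2 with
    | f₂+1, _ =>
      simp only [pvRecB]
      rcases eq_or_lt_of_le hn with h0 | h0
      · rw [← h0, pv_fd_zero (by omega)]; simp
      · by_cases hq : PySem.Int.floordiv n b = 0
        · simp [hq]
        · obtain ⟨hq0, hqlt⟩ := pv_step_lt h0 hb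
          rw [ih (PySem.Int.floordiv n b) f₂ hq0 (by omega) (by omega)]

-- one-step unfolding of pvRecB at positive fuel
theorem pvRecB_succ (al : List Char) (b : Int) (f : Nat) (n : Int) :
    pvRecB al b (f + 1) n =
      (if PySem.Int.floordiv n b ≠ 0 then pvRecB al b f (PySem.Int.floordiv n b) else [])
        ++ pvDigit al (PySem.Int.mod n b) := rfl

-- the loop (entered with num = quotient = n) equals B's recursion on n, appended to result
theorem pvLoopA_eq {al : List Char} {b : Int} (hb : 2 ≤ b) :
    ∀ (f : Nat) (n : Int) (result : List Char), 0 ≤ n → n.toNat ≤ f →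
      pvLoopA al b f n n result =
        (if n = 0 then result else pvRecB al b (n.toNat + 1) n ++ result) := by
  intro f
  induction f with
  | zero =>
    intro n result hn hf
    have : n = 0 := by omega
    simp [this, pvLoopA]
  | succ f ih =>
    intro n result hn hf
    by_cases h0 : n = 0
    · simp [h0, pvLoopA]
    · have hpos : 0 < n := lt_of_le_of_ne hn (Ne.symm h0)
      obtain ⟨hq0, hqlt⟩ := pv_step_lt hpos hb
      rw [if_neg h0]
      simp only [pvLoopA, h0, ne_eq, not_false_eq_true, if_true]
      rw [ih (PySem.Int.floordiv n b) _ hq0 (by omega), pvRecB_succ al b n.toNat n]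
      by_cases hq : PySem.Int.floordiv n b = 0
      · simp [hq]
      · rw [if_neg hq, if_pos (by simpa using hq),
            pvRecB_fuel hb ((PySem.Int.floordiv n b).toNat + 1) (PySem.Int.floordiv n b) n.toNat
              hq0 (by omega) (by omega)]
        simp [List.append_assoc]

-- ===== VERDICT (by name: the statement is the Claim_ definition above) =====
theorem fromBaseTen_spec : Claim_equal_fromBaseTen := by
  intro alphabet num _ hpre
  obtain ⟨hnum, hlen, hcase⟩ := hpre
  unfold Spec_fromBaseTen fromBaseTen fromBaseTen_alt
  have hbpos : (0:Int) < (alphabet.toList.length : Int) := by exact_mod_cast hlen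
  have hz : PySem.Int.floordiv 0 (alphabet.toList.length : Int) = 0 := pv_fd_zero hbpos
  by_cases h0 : num = 0
  · subst h0
    simp only [Int.toNat_zero, pvLoopA, pvRecB_succ, hz, ne_eq, not_true_eq_false, if_false]
    simp
  · have hb : (2:Int) ≤ (alphabet.toList.length : Int) := by
      rcases hcase with h2 | hz0
      · exact_mod_cast h2
      · omega
    have hpos : 0 < num := lt_of_le_of_ne hnum (Ne.symm h0)
    obtain ⟨hq0, hqlt⟩ := pv_step_lt hpos hb
    rw [pvLoopA_eq hb (num.toNat + 1) _ _ hq0 (by omega),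
        pvRecB_succ alphabet.toList (alphabet.toList.length : Int) num.toNat num]
    by_cases hq : PySem.Int.floordiv num (alphabet.toList.length : Int) = 0
    · rw [if_pos hq, if_neg (by simpa using hq)]; simp
    · rw [if_neg hq, if_pos (by simpa using hq),
          pvRecB_fuel hb ((PySem.Int.floordiv num (alphabet.toList.length : Int)).toNat + 1)
            (PySem.Int.floordiv num (alphabet.toList.length : Int)) num.toNat hq0 (by omega) (by omega)]
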